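-- pv_equiv track=rewrite | github.com/AdamAndrei/algorithms-and-programming-course | lab 3/ALARM_CLOCK/Better_Menu.py | subsequence_seven
-- ===== SOURCE A (Python) =====
-- def is_prime(n):
--     if n >= 2:
--         for d in range(2, n // 2 + 1):
--             if n % d == 0:
--                 return False
--         return True
--     else:
--         return False
--
-- def subsequence_seven(list):
--     beststart = 0
--     bestcount = 0
--     curentstart = 0
--     curentcount = 0
--
--     for index in range(len(list)):
--         if not is_prime(list[index]):
--             curentcount += 1
--             if curentcount == 1:
--                 curentstart = index
--             if curentcount > bestcount:
--                 bestcount = curentcount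
--                 beststart = curentstart
--         else:
--             curentcount = 0
--     return list[beststart: beststart + bestcount]
-- ===== SOURCE B (Python) =====
-- def is_prime(n):
--     if n >= 2:
--         for d in range(2, n // 2 + 1):
--             if n % d == 0:
--                 return False
--         return True
--     else:
--         return False
--
-- def subsequence_seven(list):
--     # Build all maximal runs of consecutive non-prime values, then pick the
--     # first longest run (max on length with a strict comparison keeps the
--     # earliest maximal run, and the default is [] when there are no runs).
--     runs = []
--     cur = None
--     for x in list:
--         if is_prime(x):
--             cur = None
--         elif cur is None:
--             cur = [x]
--             runs.append(cur)
--         else: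
--             cur.append(x)
--     return max(runs, key=len, default=[])
-- ===== Notes on version B (the rewrite author's own statement) =====
-- stated objective: alternative
-- what changed: Replaces the index-based best/current start-and-count state machine plus a final slice with a build-the-maximal-non-prime-runs-as-lists pass followed by selecting the first longest run with max(key=len, default=[]).
import Mathlib
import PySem

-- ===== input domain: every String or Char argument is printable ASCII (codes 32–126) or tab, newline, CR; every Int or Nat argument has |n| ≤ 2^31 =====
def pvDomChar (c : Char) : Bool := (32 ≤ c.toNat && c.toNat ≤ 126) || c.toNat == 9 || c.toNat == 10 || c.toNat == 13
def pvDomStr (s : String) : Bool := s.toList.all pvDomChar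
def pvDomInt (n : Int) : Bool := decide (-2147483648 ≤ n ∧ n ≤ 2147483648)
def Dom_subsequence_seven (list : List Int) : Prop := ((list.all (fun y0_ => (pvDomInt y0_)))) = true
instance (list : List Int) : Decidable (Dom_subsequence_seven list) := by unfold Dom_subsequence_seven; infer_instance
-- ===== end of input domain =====

-- B replaces A's index/slice best-run state machine with a build-runs-then-select-longest
-- decomposition (alternative structure, same cost).


-- ===== PORT A =====
-- is_prime's for-loop over range(2, n//2 + 1), returning False on the first divisor
-- (exact: same iterations in the same order, same early exit)
def isPrimeLoop (n d stop : Int) : Bool :=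
  if d < stop then
    if PySem.Int.mod n d == 0 then false else isPrimeLoop n (d + 1) stop
  else true
termination_by (stop - d).toNat
decreasing_by omega

def is_prime (n : Int) : Bool :=
  if 2 ≤ n then isPrimeLoop n 2 (PySem.Int.floordiv n 2 + 1) else false

-- one iteration of A's loop body over state (beststart, bestcount, curentstart, curentcount);
-- the index is always in range, so list[index] is pyGetD
def stepA (l : List Int) (st : Int × Int × Int × Int) (index : Int) : Int × Int × Int × Int :=
  let bs := st.1; let bc := st.2.1; let cs := st.2.2.1; let cc := st.2.2.2
  if !(is_prime (PySem.List.pyGetD l index 0)) then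
    let cc' := cc + 1
    let cs' := if cc' == 1 then index else cs
    if cc' > bc then (cs', cc', cs', cc') else (bs, bc, cs', cc')
  else (bs, bc, cs, 0)

def subsequence_seven (list : List Int) : List Int :=
  let s := (PySem.List.pyRange 0 (list.length : Int) 1).foldl (stepA list) (0, 0, 0, 0)
  PySem.List.slice list (some s.1) (some (s.1 + s.2.1))

-- ===== PORT B =====
-- B's loop state = (closed runs, currently open run or None); in the Python the open run
-- object already sits in `runs` (aliasing), modelled here by appending it on close / at the end.
def stepB (st : List (List Int) × Option (List Int)) (x : Int) : List (List Int) × Option (List Int) :=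
  if is_prime x then (st.1 ++ st.2.toList, none)
  else match st.2 with
    | none => (st.1, some [x])
    | some c => (st.1, some (c ++ [x]))

-- max(runs, key=len, default=[]): first run of maximal length (strict comparison keeps the earliest)
def pickLonger (best g : List Int) : List Int := if best.length < g.length then g else best

def subsequence_seven_alt (list : List Int) : List Int :=
  let st := list.foldl stepB ([], none)
  (st.1 ++ st.2.toList).foldl pickLonger []

-- ===== PRECONDITION & SPEC =====
def Spec_subsequence_seven (list : List Int) (out : List Int) : Prop := out = subsequence_seven_alt list
instance (list : List Int) (out : List Int) : Decidable (Spec_subsequence_seven list out) := by unfold Spec_subsequence_seven; infer_instance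

-- ===== CLAIM (what is proved, stated in full; the proofs are below) =====
def Claim_equal_subsequence_seven : Prop := ∀ (list : List Int), Dom_subsequence_seven list → Spec_subsequence_seven list (subsequence_seven list)

-- ===== LEMMAS AND PROOFS =====

-- the two folds over a prefix `a`, and B's selection fold
def runA (a : List Int) : Int × Int × Int × Int :=
  (PySem.List.pyRange 0 (a.length : Int) 1).foldl (stepA a) (0, 0, 0, 0)

def runB (a : List Int) : List (List Int) × Option (List Int) := a.foldl stepB ([], none)

def bestOf (rs : List (List Int)) : List Int := rs.foldl pickLonger []

-- joint loop invariant tying A's four counters to B's runs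
def LoopInv (a : List Int) : Prop :=
  let s := runA a
  let t := runB a
  let best := bestOf (t.1 ++ t.2.toList)
  0 ≤ s.1 ∧ 0 ≤ s.2.1 ∧ s.1.toNat + s.2.1.toNat ≤ a.length ∧
  s.2.1 = (best.length : Int) ∧
  best = (a.drop s.1.toNat).take s.2.1.toNat ∧
  (match t.2 with
   | none => s.2.2.2 = 0
   | some c => s.2.2.2 = (c.length : Int) ∧ c ≠ [] ∧ 0 ≤ s.2.2.1 ∧
               s.2.2.1.toNat = a.length - c.length ∧ c = a.drop s.2.2.1.toNat)

theorem drop_take_append (a : List Int) (x : Int) (i n : Nat) (h : i + n ≤ a.length) :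
    ((a ++ [x]).drop i).take n = (a.drop i).take n := by
  rw [List.drop_append_of_le_length (by omega)]
  rw [List.take_append_of_le_length (by simp; try omega)]

theorem runA_congr (a : List Int) (x : Int) :
    (PySem.List.pyRange 0 (a.length : Int) 1).foldl (stepA (a ++ [x])) (0, 0, 0, 0)
      = runA a := by
  unfold runA
  apply PySem.List.foldl_congr_mem
  intro acc i hi
  rw [PySem.List.mem_pyRange_one] at hi
  have hx : PySem.List.pyGetD (a ++ [x]) i 0 = PySem.List.pyGetD a i 0 := by
    rw [PySem.List.pyGetD_eq_getElem (a ++ [x]) 0 hi.1 (by simp; try omega),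
        PySem.List.pyGetD_eq_getElem a 0 hi.1 (by omega),
        List.getElem_append_left (by omega)]
  simp only [stepA, hx]

theorem runA_snoc (a : List Int) (x : Int) :
    runA (a ++ [x]) = stepA (a ++ [x]) (runA a) (a.length : Int) := by
  have h1 : runA (a ++ [x])
      = (PySem.List.pyRange 0 ((a.length : Int) + 1) 1).foldl (stepA (a ++ [x])) (0, 0, 0, 0) := by
    unfold runA; norm_num
  rw [h1, PySem.List.pyRange_one_succ_right (by positivity), List.foldl_append, runA_congr]
  simp only [List.foldl_cons, List.foldl_nil]

theorem runB_snoc (a : List Int) (x : Int) :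
    runB (a ++ [x]) = stepB (runB a) x := by
  unfold runB
  rw [List.foldl_append]
  simp only [List.foldl_cons, List.foldl_nil]

theorem bestOf_snoc (rs : List (List Int)) (g : List Int) :
    bestOf (rs ++ [g]) = pickLonger (bestOf rs) g := by
  unfold bestOf
  rw [List.foldl_append]
  simp only [List.foldl_cons, List.foldl_nil]

theorem len_pickLonger (d g : List Int) : (pickLonger d g).length = max d.length g.length := by
  unfold pickLonger; split_ifs <;> omega

theorem pyGetD_append_length (a : List Int) (x : Int) :
    PySem.List.pyGetD (a ++ [x]) (a.length : Int) 0 = x := by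
  rw [PySem.List.pyGetD_eq_getElem (a ++ [x]) 0 (by positivity) (by simp)]
  simp

theorem inv_holds (a : List Int) : LoopInv a := by
  induction a using List.reverseRecOn with
  | nil =>
    unfold LoopInv runA runB bestOf
    simp
  | append_singleton a x ih =>
    unfold LoopInv at ih ⊢
    rw [runA_snoc, runB_snoc]
    rcases hS : runA a with ⟨bs, bc, cs, cc⟩
    rcases hT : runB a with ⟨done, cur⟩
    rw [hS, hT] at ih
    simp only at ih ⊢
    obtain ⟨hbs0, hbc0, hle, hbclen, hbest, hcur⟩ := ih
    by_cases hp : is_prime x = true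
    · -- prime: A resets curentcount, B closes the run; the run list is unchanged
      have hA : stepA (a ++ [x]) (bs, bc, cs, cc) (a.length : Int) = (bs, bc, cs, 0) := by
        simp [stepA, hp]
      have hB : stepB (done, cur) x = (done ++ cur.toList, none) := by
        simp [stepB, hp]
      rw [hA, hB]
      simp only [Option.toList_none, List.append_nil]
      refine ⟨hbs0, hbc0, by simp; try omega, hbclen, ?_, trivial⟩
      rw [hbest]
      exact (drop_take_append a x _ _ (by omega)).symm
    · have hpx : is_prime x = false := by simpa using hp
      cases cur with
      | none =>
        -- a fresh run [x] starts at index a.length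
        simp only at hcur
        subst hcur
        simp only [Option.toList_none, List.append_nil] at hbclen hbest
        have hB : stepB (done, none) x = (done, some [x]) := by
          simp [stepB, hpx]
        by_cases hgt : (0 : Int) + 1 > bc
        · have hbc : bc = 0 := by omega
          subst hbc
          have hbd : bestOf done = [] := by
            have : (bestOf done).length = 0 := by omega
            exact List.eq_nil_of_length_eq_zero this
          have hA : stepA (a ++ [x]) (bs, 0, cs, 0) (a.length : Int)
              = ((a.length : Int), 1, (a.length : Int), 1) := by
            simp [stepA, hpx]
          rw [hA, hB]
          simp only [Option.toList_some]
          refine ⟨by positivity, by norm_num, by simp; try omega, ?_, ?_,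
                  by norm_num, by simp, by positivity, by simp, ?_⟩
          · rw [bestOf_snoc, hbd]
            simp [pickLonger]
          · rw [bestOf_snoc, hbd]
            simp only [pickLonger, List.length_nil, List.length_cons, List.length_nil]
            rw [if_pos (by omega)]
            rw [show ((a.length : Int)).toNat = a.length by omega, List.drop_left]
            simp
          · rw [show ((a.length : Int)).toNat = a.length by omega, List.drop_left]
        · have hA : stepA (a ++ [x]) (bs, bc, cs, 0) (a.length : Int)
              = (bs, bc, (a.length : Int), 1) := by
            simp [stepA, hpx]
            omega
          rw [hA, hB]
          simp only [Option.toList_some]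
          have hbb : bestOf (done ++ [[x]]) = bestOf done := by
            rw [bestOf_snoc]
            unfold pickLonger
            rw [if_neg (by intro hlt; simp at hlt; rw [hlt] at hbclen; simp at hbclen; omega)]
          refine ⟨hbs0, hbc0, by simp; try omega, by rw [hbb]; exact hbclen, ?_,
                  by norm_num, by simp, by positivity, by simp, ?_⟩
          · rw [hbb, hbest]
            exact (drop_take_append a x _ _ (by omega)).symm
          · rw [show ((a.length : Int)).toNat = a.length by omega, List.drop_left]
      | some c =>
        simp only at hcur
        obtain ⟨hcc, hcne, hcs0, hcsn, hcd⟩ := hcur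
        subst hcc
        have hclen : 0 < c.length := List.length_pos_of_ne_nil hcne
        have hcla : c.length + cs.toNat = a.length := by
          have := congrArg List.length hcd
          simp [List.length_drop] at this
          omega
        simp only [Option.toList_some] at hbclen hbest
        rw [bestOf_snoc] at hbclen hbest
        have hB : stepB (done, some c) x = (done, some (c ++ [x])) := by
          simp [stepB, hpx]
        have hne1 : (((c.length : Int) + 1) == 1) = false := by
          simp; omega
        have hdrop : (a ++ [x]).drop cs.toNat = c ++ [x] := by
          rw [List.drop_append_of_le_length (by omega), ← hcd]
        by_cases hgt : (c.length : Int) + 1 > bc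
        · have hA : stepA (a ++ [x]) (bs, bc, cs, (c.length : Int)) (a.length : Int)
              = (cs, (c.length : Int) + 1, cs, (c.length : Int) + 1) := by
            simp only [stepA, pyGetD_append_length, hpx, hne1]
            simp only [Bool.not_false, if_true, Bool.false_eq_true, if_false]
            rw [if_pos (by exact_mod_cast hgt)]
          rw [hA, hB]
          simp only [Option.toList_some]
          have hdlt : (bestOf done).length < c.length + 1 := by
            have h1 : (pickLonger (bestOf done) c).length = max (bestOf done).length c.length :=
              len_pickLonger _ _
            omega
          have hbb : bestOf (done ++ [c ++ [x]]) = c ++ [x] := by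
            rw [bestOf_snoc]
            unfold pickLonger
            rw [if_pos (by simp; try omega)]
          refine ⟨hcs0, by positivity, by simp; try omega, by rw [hbb]; simp, ?_,
                  by simp, by simp, hcs0, by simp; try omega, ?_⟩
          · rw [hbb, hdrop]
            rw [List.take_of_length_le (by simp; try omega)]
          · rw [hdrop]
        · have hA : stepA (a ++ [x]) (bs, bc, cs, (c.length : Int)) (a.length : Int)
              = (bs, bc, cs, (c.length : Int) + 1) := by
            simp only [stepA, pyGetD_append_length, hpx, hne1]
            simp only [Bool.not_false, if_true, Bool.false_eq_true, if_false]
            rw [if_neg (by exact_mod_cast hgt)]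
          rw [hA, hB]
          simp only [Option.toList_some]
          have hdge : c.length + 1 ≤ (bestOf done).length := by
            have h1 : (pickLonger (bestOf done) c).length = max (bestOf done).length c.length :=
              len_pickLonger _ _
            omega
          have hpc : pickLonger (bestOf done) c = bestOf done := by
            unfold pickLonger
            rw [if_neg (by omega)]
          have hbb : bestOf (done ++ [c ++ [x]]) = bestOf done := by
            rw [bestOf_snoc]
            unfold pickLonger
            rw [if_neg (by simp; try omega)]
          rw [hpc] at hbclen hbest
          refine ⟨hbs0, hbc0, by simp; try omega, by rw [hbb]; exact hbclen, ?_,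
                  by simp, by simp, hcs0, by simp; try omega, ?_⟩
          · rw [hbb, hbest]
            exact (drop_take_append a x _ _ (by omega)).symm
          · rw [hdrop]

-- ===== VERDICT (by name: the statement is the Claim_ definition above) =====
theorem subsequence_seven_spec : Claim_equal_subsequence_seven := by
  intro l _
  unfold Spec_subsequence_seven
  have h := inv_holds l
  unfold LoopInv at h
  obtain ⟨hbs0, hbc0, hle, hbclen, hbest, -⟩ := h
  have e1 : subsequence_seven l
      = PySem.List.slice l (some (runA l).1) (some ((runA l).1 + (runA l).2.1)) := rfl
  have e2 : subsequence_seven_alt l = bestOf ((runB l).1 ++ (runB l).2.toList) := rfl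
  rw [e1, e2, PySem.List.slice_toNat l hbs0 (by omega)]
  rw [show ((runA l).1 + (runA l).2.1).toNat - (runA l).1.toNat = (runA l).2.1.toNat by omega]
  exact hbest.symm
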